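-- pv_equiv track=rewrite | github.com/Arsen1302/Code-copy-detector | TestData/solutions/problem_808_5.py | solution_808_5
-- ===== SOURCE A (Python) =====
-- from typing import List
--
-- def solution_808_5(nums: List[int]) -> int:
--     ans = 0
--     cnt, freq = {}, {}
--     for i, x in enumerate(nums):
--         if x in cnt and cnt[x] in freq:
--             freq[cnt[x]] -= 1
--             if not freq[cnt[x]]: freq.pop(cnt[x])
--         cnt[x] = 1 + cnt.get(x, 0)
--         freq[cnt[x]] = 1 + freq.get(cnt[x], 0)
--         if len(freq) == 1 and (1 in freq or 1 in freq.values()): ans = i+1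
--         elif len(freq) == 2 and (freq.get(1, 0) == 1 or freq.get(1+min(freq), 0) == 1): ans = i+1
--     return ans
-- ===== SOURCE B (Python) =====
-- from typing import List
--
-- def solution_808_5(nums: List[int]) -> int:
--     ans = 0
--     cnt = {}
--     for i, x in enumerate(nums):
--         cnt[x] = cnt.get(x, 0) + 1
--         vals = list(cnt.values())
--         distinct = sorted(set(vals))
--         if len(distinct) == 1:
--             if distinct[0] == 1 or len(cnt) == 1:
--                 ans = i + 1
--         elif len(distinct) == 2:
--             mn, mx = distinct
--             if (mn == 1 and vals.count(1) == 1) or (mx == mn + 1 and vals.count(mx) == 1):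
--                 ans = i + 1
--     return ans
-- ===== Notes on version B (the rewrite author's own statement) =====
-- stated objective: simpler
-- what changed: B drops A's incrementally-maintained frequency-of-counts dict entirely: it keeps only the element counter and, at each step, decides validity directly from sorted(set(cnt.values())) and a count over the values, trading A's O(n) bucket bookkeeping for an O(n^2) but much plainer rescan.
import Mathlib
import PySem

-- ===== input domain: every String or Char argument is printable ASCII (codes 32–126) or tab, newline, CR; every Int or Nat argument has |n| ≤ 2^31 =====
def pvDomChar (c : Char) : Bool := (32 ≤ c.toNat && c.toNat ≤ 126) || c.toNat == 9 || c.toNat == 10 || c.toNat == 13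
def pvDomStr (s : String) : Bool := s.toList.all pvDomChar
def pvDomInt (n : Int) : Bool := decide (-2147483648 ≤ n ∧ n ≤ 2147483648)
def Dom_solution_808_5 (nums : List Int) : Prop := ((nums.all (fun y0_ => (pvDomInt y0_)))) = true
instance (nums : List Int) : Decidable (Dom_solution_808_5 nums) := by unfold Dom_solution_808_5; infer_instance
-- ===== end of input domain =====

-- B keeps only the per-element counter and re-derives validity from its value multiset at each
-- step (no frequency-of-counts dict); objective: simpler. Same return value on every input.

-- ===== PORT A =====
-- A's validity test on the freq dict (the if/elif updating ans, as one expression)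
def ansA (i a : Int) (freq : PySem.Dict Int Int) : Int :=
  if freq.size == 1 && (freq.contains 1 || freq.values.contains 1) then i + 1
  else if freq.size == 2 && (freq.getD 1 0 == 1 ||
      (match PySem.List.min? freq.keys (fun y => y) with   -- min(freq)
       | some m => freq.getD (1 + m) 0 == 1
       | none => false)) then i + 1
  else a

-- loop body of A (one iteration of `for i, x in enumerate(nums)`)
def stepA (s : Int × PySem.Dict Int Int × PySem.Dict Int Int) (ix : Int × Int) :
    Int × PySem.Dict Int Int × PySem.Dict Int Int :=
  let ans := s.1; let cnt := s.2.1; let freq := s.2.2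
  let i := ix.1; let x := ix.2
  -- if x in cnt and cnt[x] in freq: freq[cnt[x]] -= 1; if not freq[cnt[x]]: freq.pop(cnt[x])
  -- (freq.pop's returned value is discarded by the Python, so the pop is an erase)
  let freq :=
    if cnt.contains x && freq.contains (cnt.getD x 0) then
      let c := cnt.getD x 0
      let f1 := freq.insert c (freq.getD c 0 - 1)
      if f1.getD c 0 == 0 then f1.erase c else f1
    else freq
  let cnt := cnt.insert x (1 + cnt.getD x 0)       -- cnt[x] = 1 + cnt.get(x, 0)
  let n := cnt.getD x 0                             -- the re-read cnt[x]
  let freq := freq.insert n (1 + freq.getD n 0)     -- freq[cnt[x]] = 1 + freq.get(cnt[x], 0)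
  (ansA i ans freq, cnt, freq)

def solution_808_5 (nums : List Int) : Int :=
  ((PySem.List.enumerate nums 0).foldl stepA (0, PySem.Dict.empty, PySem.Dict.empty)).1

-- ===== PORT B =====
-- B's validity test, straight off sorted(set(cnt.values())) and cnt itself
def ansB (i a : Int) (cnt : PySem.Dict Int Int) : Int :=
  let vals := cnt.values
  match PySem.List.sorted (PySem.Set.ofList vals) (fun y => y) false with
  | [v] => if v == 1 || cnt.size == 1 then i + 1 else a
  | [mn, mx] =>
      if (mn == 1 && PySem.List.count vals 1 == 1) ||
         (mx == mn + 1 && PySem.List.count vals mx == 1) then i + 1 else a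
  | _ => a

-- loop body of B: update cnt, then judge validity from the current counts
def stepB (s : Int × PySem.Dict Int Int) (ix : Int × Int) : Int × PySem.Dict Int Int :=
  let ans := s.1; let cnt := s.2
  let i := ix.1; let x := ix.2
  let cnt := cnt.insert x (cnt.getD x 0 + 1)
  (ansB i ans cnt, cnt)

def solution_808_5_alt (nums : List Int) : Int :=
  ((PySem.List.enumerate nums 0).foldl stepB (0, PySem.Dict.empty)).1

-- ===== PRECONDITION & SPEC =====
def Spec_solution_808_5 (nums : List Int) (out : Int) : Prop := out = solution_808_5_alt nums
instance (nums : List Int) (out : Int) : Decidable (Spec_solution_808_5 nums out) := by unfold Spec_solution_808_5; infer_instance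

-- ===== CLAIM (what is proved, stated in full; the proofs are below) =====
def Claim_equal_solution_808_5 : Prop := ∀ (nums : List Int), Dom_solution_808_5 nums → Spec_solution_808_5 nums (solution_808_5 nums)

-- ===== LEMMAS AND PROOFS =====

-- the coupling invariant: freq is the count-of-counts table of cnt
def CFInv (cnt freq : PySem.Dict Int Int) : Prop :=
  cnt.keys.Nodup ∧ freq.keys.Nodup ∧ (∀ v ∈ cnt.values, 1 ≤ v) ∧
  (∀ k : Int, freq.getD k 0 = (cnt.values.count k : Int)) ∧
  (∀ k : Int, freq.contains k = true ↔ cnt.values.count k ≠ 0)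

theorem dget?_erase (d : PySem.Dict Int Int) (k k' : Int) :
    (d.erase k).get? k' = if k' = k then none else d.get? k' := by
  obtain ⟨l⟩ := d
  induction l with
  | nil => simp [PySem.Dict.erase, PySem.Dict.get?]
  | cons p t ih =>
      simp only [PySem.Dict.erase, PySem.Dict.get?, List.filter_cons] at *
      by_cases hk : p.1 = k <;> by_cases hk' : p.1 = k' <;>
        simp_all [beq_iff_eq]

theorem keys_erase (d : PySem.Dict Int Int) (k : Int) :
    (d.erase k).keys = d.keys.filter (fun a => !(a == k)) := by
  obtain ⟨l⟩ := d
  induction l with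
  | nil => rfl
  | cons p t ih =>
      simp only [PySem.Dict.erase, PySem.Dict.keys, List.filter_cons] at *
      by_cases hk : p.1 = k <;> simp_all

theorem getD_erase (d : PySem.Dict Int Int) (k k' : Int) :
    (d.erase k).getD k' 0 = if k' = k then 0 else d.getD k' 0 := by
  rw [PySem.Dict.getD_eq_get?_getD, dget?_erase, PySem.Dict.getD_eq_get?_getD]
  split_ifs <;> rfl

theorem contains_erase (d : PySem.Dict Int Int) (k k' : Int) :
    (d.erase k).contains k' = true ↔ (k' ≠ k ∧ d.contains k' = true) := by
  rw [PySem.Dict.contains_iff_mem_keys, keys_erase, List.mem_filter,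
      PySem.Dict.contains_iff_mem_keys]
  simp [and_comm]

theorem nodup_keys_erase (d : PySem.Dict Int Int) (k : Int) (h : d.keys.Nodup) :
    (d.erase k).keys.Nodup := by
  rw [keys_erase]; exact h.filter _

theorem insert_split (d : PySem.Dict Int Int) (x c v : Int) (hnd : d.keys.Nodup)
    (hg : d.get? x = some c) :
    ∃ l1 l2, d.items = l1 ++ (x, c) :: l2 ∧ (d.insert x v).items = l1 ++ (x, v) :: l2 ∧
      x ∉ l1.map Prod.fst ∧ x ∉ l2.map Prod.fst := by
  have hmem : (x, c) ∈ d.items := PySem.Dict.mem_items_of_get?_eq_some d hg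
  obtain ⟨l1, l2, hsplit⟩ := List.append_of_mem hmem
  have hkeys : d.keys = l1.map Prod.fst ++ x :: l2.map Prod.fst := by
    simp [PySem.Dict.keys, hsplit]
  rw [hkeys] at hnd
  have h1 : x ∉ l1.map Prod.fst := by
    intro hx
    exact (List.disjoint_of_nodup_append hnd) hx (by simp)
  have h2 : x ∉ l2.map Prod.fst := by
    have := (List.nodup_append.mp hnd).2.1
    simp only [List.nodup_cons] at this
    exact this.1
  refine ⟨l1, l2, hsplit, ?_, h1, h2⟩
  have hcont : d.contains x = true := by
    simp [PySem.Dict.contains, hsplit]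
  simp only [PySem.Dict.insert, hcont, if_pos, hsplit]
  rw [List.map_append, List.map_cons]
  congr 1
  · rw [show (l1.map fun p => if (p.1 == x) = true then (x, v) else p) = l1.map id from ?_, List.map_id]
    apply List.map_congr_left
    intro p hp
    have : p.1 ≠ x := fun he => h1 (he ▸ List.mem_map_of_mem hp)
    simp [this]
  · simp only [beq_self_eq_true, if_pos, List.map_cons]
    congr 1
    rw [show (l2.map fun p => if (p.1 == x) = true then (x, v) else p) = l2.map id from ?_, List.map_id]
    apply List.map_congr_left
    intro p hp
    have : p.1 ≠ x := fun he => h2 (he ▸ List.mem_map_of_mem hp)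
    simp [this]

theorem values_insert_fresh (d : PySem.Dict Int Int) (x v : Int) (h : d.contains x = false) :
    (d.insert x v).values = d.values ++ [v] := by
  simp [PySem.Dict.insert, h, PySem.Dict.values]

-- A's validity test equals B's validity test whenever freq tabulates cnt's value counts
theorem check_eq (c f : PySem.Dict Int Int) (h : CFInv c f) (i a : Int) :
    ansA i a f = ansB i a c := by
  obtain ⟨hndc, hndf, hpos, hgetD, hcont⟩ := h
  have hmemv : ∀ k : Int, k ∈ f.keys ↔ c.values.count k ≠ 0 := fun k =>
    (PySem.Dict.contains_iff_mem_keys f k).symm.trans (hcont k)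
  have hperm : f.keys.Perm (PySem.Set.ofList c.values) := by
    refine (List.perm_ext_iff_of_nodup hndf (PySem.Set.nodup_ofList _)).mpr ?_
    intro k
    rw [hmemv k, PySem.Set.mem_ofList, ← List.count_pos_iff]
    omega
  have hDperm : (PySem.List.sorted (PySem.Set.ofList c.values) (fun y => y) false).Perm f.keys :=
    (PySem.List.sorted_perm _ _ _).trans hperm.symm
  have hmemD : ∀ k : Int,
      k ∈ PySem.List.sorted (PySem.Set.ofList c.values) (fun y => y) false ↔
        c.values.count k ≠ 0 := by
    intro k; rw [hDperm.mem_iff]; exact hmemv k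
  have hDlt := PySem.List.sorted_ofList_pairwise_lt (κ := Int) c.values
  have hsz : f.size = (PySem.List.sorted (PySem.Set.ofList c.values) (fun y => y) false).length := by
    have h1 : f.size = f.keys.length := by simp [PySem.Dict.size, PySem.Dict.keys]
    rw [h1, ← hDperm.length_eq]
  have hvlen : c.size = c.values.length := by simp [PySem.Dict.size, PySem.Dict.values]
  unfold ansA ansB
  rcases hshape : PySem.List.sorted (PySem.Set.ofList c.values) (fun y => y) false with
    _ | ⟨v, _ | ⟨mx, _ | ⟨w, t⟩⟩⟩ <;>
    rw [hshape] at hmemD hDlt hsz <;> simp only [hshape]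
  · -- no distinct count values
    simp [hsz]
  · -- one distinct count value v
    have hkeys : f.keys = [v] := List.perm_singleton.mp (hshape ▸ hDperm).symm
    have hall : ∀ y ∈ c.values, y = v := by
      intro y hy
      have : c.values.count y ≠ 0 := by
        rw [← List.count_pos_iff] at hy; omega
      have := (hmemD y).mpr this
      simpa using this
    have hcv : c.values.count v = c.values.length :=
      List.count_eq_length.mpr (fun b hb => (hall b hb).symm)
    have hc1 : f.contains 1 = true ↔ v = 1 := by
      rw [PySem.Dict.contains_iff_mem_keys, hkeys]
      simp [eq_comm]
    have hfv : f.values = [(c.values.count v : Int)] := by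
      rw [PySem.Dict.values_eq_map_keys f hndf 0, hkeys]
      simp [hgetD]
    have hvc : f.values.contains 1 = true ↔ c.size = 1 := by
      rw [List.contains_iff_mem, hfv, hvlen]
      simp
      omega
    have hvc' : (1 : Int) ∈ f.values ↔ c.size = 1 := by
      rw [← List.contains_iff_mem]; exact hvc
    have hc1' : (1 : Int) ∈ f.keys ↔ v = 1 := by
      rw [← PySem.Dict.contains_iff_mem_keys]; exact hc1
    by_cases h1 : v = 1 <;> by_cases h2 : c.size = 1 <;>
      simp [hsz, h1, h2, hc1, hvc', hc1', ← PySem.Dict.contains_iff_mem_keys]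
  · -- two distinct count values mn < mx  (here named v and mx)
    have hlt : v < mx := by simpa using hDlt
    have hkperm : f.keys.Perm [v, mx] := by
      have h' := hDperm; rw [hshape] at h'; exact h'.symm
    have hvcnt : List.count v c.values ≠ 0 := (hmemD v).mp (by simp)
    have hxcnt : List.count mx c.values ≠ 0 := (hmemD mx).mp (by simp)
    have hvvals : v ∈ c.values := by rw [← List.count_pos_iff]; omega
    have hposv : 1 ≤ v := hpos v hvvals
    have hmin : PySem.List.min? f.keys (fun y => y) = some v := by
      cases hm : PySem.List.min? f.keys (fun y => y) with
      | none =>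
          have hnil : f.keys = [] := (PySem.List.min?_eq_none_iff _ _).mp hm
          have hlen := hkperm.length_eq
          rw [hnil] at hlen
          simp at hlen
      | some m =>
          have hmm : m ∈ f.keys := PySem.List.min?_mem hm
          have hmin' := PySem.List.min?_isMin hm
          have hvk : v ∈ f.keys := hkperm.mem_iff.mpr (by simp)
          have hle : m ≤ v := hmin' v hvk
          have hm2 : m ∈ ([v, mx] : List Int) := hkperm.mem_iff.mp hmm
          simp at hm2
          rcases hm2 with h' | h'
          · rw [h']
          · omega
    have hs1 : (f.size == 1) = false := by simp [hsz]
    have hs2 : (f.size == 2) = true := by simp [hsz]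
    have iff1 : List.count 1 c.values = 1 → v = 1 := by
      intro hc
      have hmem : (1 : Int) ∈ ([v, mx] : List Int) := (hmemD 1).mpr (by omega)
      simp at hmem
      rcases hmem with h' | h' <;> omega
    have iff2f : List.count (1 + v) c.values = 1 → mx = v + 1 := by
      intro hc
      have hmem : (1 + v : Int) ∈ ([v, mx] : List Int) := (hmemD (1 + v)).mpr (by omega)
      simp at hmem
      rcases hmem with h' | h' <;> omega
    have hcond : (f.getD 1 0 == 1 ||
        (match PySem.List.min? f.keys (fun y => y) with
         | some m => f.getD (1 + m) 0 == 1
         | none => false)) =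
        ((v == 1 && PySem.List.count c.values 1 == 1) ||
         (mx == v + 1 && PySem.List.count c.values mx == 1)) := by
      rw [hmin]
      simp only [hgetD, PySem.List.count_eq]
      rw [Bool.eq_iff_iff]
      simp only [Bool.or_eq_true, Bool.and_eq_true, beq_iff_eq]
      constructor
      · rintro (hc | hc)
        · have hn : List.count 1 c.values = 1 := by omega
          exact Or.inl ⟨iff1 hn, by omega⟩
        · have hn : List.count (1 + v) c.values = 1 := by omega
          have hmxeq := iff2f hn
          refine Or.inr ⟨hmxeq, ?_⟩
          rw [show mx = 1 + v from by omega]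
          omega
      · rintro (⟨hv1, hc⟩ | ⟨hmxeq, hc⟩)
        · exact Or.inl (by omega)
        · refine Or.inr ?_
          rw [show (1 + v : Int) = mx from by omega]
          omega
    simp only [hs1, hs2, hcond, Bool.false_and, Bool.true_and, if_false, Bool.false_eq_true]
  · -- three or more distinct count values
    have h1 : (f.size == 1) = false := by
      simp only [beq_eq_false_iff_ne, ne_eq, hsz, List.length_cons]
      omega
    have h2 : (f.size == 2) = false := by
      simp only [beq_eq_false_iff_ne, ne_eq, hsz, List.length_cons]
      omega
    simp [h1, h2]

theorem stepA_true (a i x : Int) (c f : PySem.Dict Int Int)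
    (h : (c.contains x && f.contains (c.getD x 0)) = true) :
    stepA (a, c, f) (i, x) =
      (let c0 := c.getD x 0
       let f1 := f.insert c0 (f.getD c0 0 - 1)
       let f2 := if f1.getD c0 0 == 0 then f1.erase c0 else f1
       let cnt := c.insert x (1 + c0)
       let n := cnt.getD x 0
       let fF := f2.insert n (1 + f2.getD n 0)
       (ansA i a fF, cnt, fF)) := by
  simp only [stepA, h, if_true]

theorem stepA_false (a i x : Int) (c f : PySem.Dict Int Int)
    (h : (c.contains x && f.contains (c.getD x 0)) = false) :
    stepA (a, c, f) (i, x) =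
      (let cnt := c.insert x (1 + c.getD x 0)
       let n := cnt.getD x 0
       let fF := f.insert n (1 + f.getD n 0)
       (ansA i a fF, cnt, fF)) := by
  simp only [stepA, h, Bool.false_eq_true, if_false]

theorem stepB_eq (a i x : Int) (c : PySem.Dict Int Int) :
    stepB (a, c) (i, x) =
      (ansB i a (c.insert x (c.getD x 0 + 1)), c.insert x (c.getD x 0 + 1)) := by
  simp only [stepB]

theorem step_lemma (a i x : Int) (c f : PySem.Dict Int Int) (h : CFInv c f) :
    (stepA (a, c, f) (i, x)).1 = (stepB (a, c) (i, x)).1 ∧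
    (stepA (a, c, f) (i, x)).2.1 = (stepB (a, c) (i, x)).2 ∧
    CFInv (stepA (a, c, f) (i, x)).2.1 (stepA (a, c, f) (i, x)).2.2 := by
  obtain ⟨hndc, hndf, hpos, hgetD, hcont⟩ := h
  by_cases hx : c.contains x = true
  · -- x is already counted
    cases hgq : c.get? x with
    | none =>
        exfalso
        have hh := PySem.Dict.contains_eq_isSome_get? (d := c) (k := x)
        rw [hgq, hx] at hh
        simp at hh
    | some c0 =>
        have hgd : c.getD x 0 = c0 := PySem.Dict.getD_of_get?_eq_some c 0 hgq
        have hc0mem : c0 ∈ c.values := by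
          have hmi := PySem.Dict.mem_items_of_get?_eq_some c hgq
          exact List.mem_map_of_mem hmi
        have hc0pos : 1 ≤ c0 := hpos c0 hc0mem
        have hc0cnt : List.count c0 c.values ≠ 0 := by
          rw [← List.count_pos_iff] at hc0mem; omega
        have hfc0 : f.contains c0 = true := (hcont c0).mpr hc0cnt
        have hcondA : (c.contains x && f.contains (c.getD x 0)) = true := by
          rw [hx, hgd, hfc0]; rfl
        rw [stepA_true a i x c f hcondA, stepB_eq]
        simp only [hgd]
        have hca : (1 : Int) + c0 = c0 + 1 := by ring
        -- the new cnt, same on both sides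
        rw [PySem.Dict.getD_insert_self, PySem.Dict.getD_insert_self c x (1 + c0) 0, hgetD c0]
        obtain ⟨l1, l2, hitems, hitems', hl1, hl2⟩ := insert_split c x c0 (1 + c0) hndc hgq
        have hvals : c.values = l1.map Prod.snd ++ c0 :: l2.map Prod.snd := by
          simp [PySem.Dict.values, hitems]
        have hvals' : (c.insert x (1 + c0)).values =
            l1.map Prod.snd ++ (1 + c0) :: l2.map Prod.snd := by
          simp [PySem.Dict.values, hitems']
        have hcount' : ∀ k : Int, List.count k (c.insert x (1 + c0)).values +
            (if k = c0 then 1 else 0) = List.count k c.values + (if k = 1 + c0 then 1 else 0) := by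
          intro k
          rw [hvals', show List.count k c.values =
            List.count k (l1.map Prod.snd ++ c0 :: l2.map Prod.snd) from by rw [← hvals]]
          simp only [List.count_append, List.count_cons]
          split_ifs <;> simp_all <;> omega
        have hposv' : ∀ v ∈ (c.insert x (1 + c0)).values, 1 ≤ v := by
          intro v hv
          rw [hvals'] at hv
          rcases List.mem_append.mp hv with h' | h'
          · exact hpos v (by rw [hvals]; exact List.mem_append.mpr (Or.inl h'))
          · rcases List.mem_cons.mp h' with h'' | h''
            · omega
            · exact hpos v (by rw [hvals]; exact List.mem_append.mpr (Or.inr (List.mem_cons_of_mem _ h'')))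
        have hne : (1 + c0 : Int) ≠ c0 := by omega
        suffices H : ∀ f2 : PySem.Dict Int Int, f2.keys.Nodup →
            (∀ k : Int, f2.getD k 0 = if k = c0 then (List.count c0 c.values : Int) - 1
              else (List.count k c.values : Int)) →
            (∀ k : Int, f2.contains k = true ↔
              (if k = c0 then List.count c0 c.values ≠ 1 else List.count k c.values ≠ 0)) →
            (ansA i a (f2.insert (1 + c0) (1 + f2.getD (1 + c0) 0)) =
               ansB i a (c.insert x (c0 + 1)) ∧
             c.insert x (1 + c0) = c.insert x (c0 + 1) ∧
             CFInv (c.insert x (1 + c0)) (f2.insert (1 + c0) (1 + f2.getD (1 + c0) 0))) by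
          by_cases hK1 : List.count c0 c.values = 1
          · have hb : (((List.count c0 c.values : Int) - 1) == 0) = true := by
              simp [hK1]
            rw [hb]
            simp only [if_true]
            apply H
            · exact nodup_keys_erase _ _ (PySem.Dict.nodup_keys_insert _ _ _ hndf)
            · intro k
              rw [getD_erase]
              split_ifs with h'
              · simp [hK1]
              · rw [PySem.Dict.getD_insert, if_neg h', hgetD]
            · intro k
              rw [contains_erase]
              split_ifs with h'
              · simp [h', hK1]
              · rw [PySem.Dict.contains_insert]
                simp only [beq_iff_eq, h', Bool.or_eq_true, false_or]
                simp [h', hcont k]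
          · have hb : (((List.count c0 c.values : Int) - 1) == 0) = false := by
              simp only [beq_eq_false_iff_ne, ne_eq]
              intro hh
              apply hK1
              omega
            rw [hb]
            simp only [Bool.false_eq_true, if_false]
            apply H
            · exact PySem.Dict.nodup_keys_insert _ _ _ hndf
            · intro k
              rw [PySem.Dict.getD_insert]
              split_ifs with h'
              · rfl
              · rw [hgetD]
            · intro k
              rw [PySem.Dict.contains_insert]
              simp only [beq_iff_eq, Bool.or_eq_true]
              split_ifs with h'
              · simp [h', hK1]
              · simp [h', hcont k]
        intro f2 hnd2 hgetD2 hcont2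
        have hg2n : f2.getD (1 + c0) 0 = (List.count (1 + c0) c.values : Int) := by
          rw [hgetD2, if_neg hne]
        have hInv' : CFInv (c.insert x (1 + c0)) (f2.insert (1 + c0) (1 + f2.getD (1 + c0) 0)) := by
          refine ⟨PySem.Dict.nodup_keys_insert _ _ _ hndc,
            PySem.Dict.nodup_keys_insert _ _ _ hnd2, hposv', ?_, ?_⟩
          · intro k
            rw [PySem.Dict.getD_insert]
            split_ifs with h'
            · subst h'
              have := hcount' (1 + c0)
              rw [if_neg hne, if_pos rfl] at this
              rw [hg2n]
              omega
            · rw [hgetD2]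
              split_ifs with h''
              · have hck := hcount' k
                rw [h''] at hck ⊢
                rw [if_pos rfl, if_neg (by omega : (c0 : Int) ≠ 1 + c0)] at hck
                omega
              · have := hcount' k
                rw [if_neg h'', if_neg h'] at this
                omega
          · intro k
            rw [PySem.Dict.contains_insert]
            simp only [beq_iff_eq, Bool.or_eq_true]
            rw [hcont2 k]
            have hc' := hcount' k
            by_cases h' : k = 1 + c0
            · subst h'
              rw [if_neg hne, if_pos rfl] at hc'
              rw [if_neg hne]
              constructor
              · intro _; omega
              · intro _; exact Or.inl rfl
            · by_cases h'' : k = c0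
              · rw [h''] at hc' ⊢
                rw [if_pos rfl, if_neg (show (c0 : Int) ≠ 1 + c0 by omega)] at hc'
                rw [if_pos rfl]
                constructor
                · rintro (hh | hh) <;> omega
                · intro hh; right; omega
              · rw [if_neg h'', if_neg h'] at hc'
                rw [if_neg h'']
                constructor
                · rintro (hh | hh)
                  · exact absurd hh h'
                  · omega
                · intro hh; right; omega
        refine ⟨?_, by rw [hca], hInv'⟩
        rw [show (c0 + 1 : Int) = 1 + c0 from by ring]
        exact check_eq _ _ hInv' i a
  · -- first occurrence of x
    have hx' : c.contains x = false := by simpa using hx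
    have hg0 : c.getD x 0 = 0 := PySem.Dict.getD_of_not_contains c 0 hx'
    have hcondA : (c.contains x && f.contains (c.getD x 0)) = false := by
      rw [hx']; rfl
    rw [stepA_false a i x c f hcondA, stepB_eq]
    simp only [hg0]
    have hvals' : (c.insert x 1).values = c.values ++ [1] := values_insert_fresh c x 1 hx'
    have hInv' : CFInv (c.insert x 1) (f.insert 1 (1 + f.getD 1 0)) := by
      refine ⟨PySem.Dict.nodup_keys_insert _ _ _ hndc, PySem.Dict.nodup_keys_insert _ _ _ hndf, ?_, ?_, ?_⟩
      · intro v hv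
        rw [hvals'] at hv
        rcases List.mem_append.mp hv with h' | h'
        · exact hpos v h'
        · simp at h'; omega
      · intro k
        rw [PySem.Dict.getD_insert, hvals', List.count_append]
        by_cases hk : k = 1
        · subst hk; rw [if_pos rfl, hgetD]; push_cast; simp; ring
        · rw [if_neg hk, hgetD]
          have : List.count k [(1 : Int)] = 0 := by simp [List.count_singleton]; omega
          rw [this]; simp
      · intro k
        rw [PySem.Dict.contains_insert, hvals', List.count_append]
        by_cases hk : k = 1
        · subst hk; simp
        · have : List.count k [(1 : Int)] = 0 := by simp [List.count_singleton]; omega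
          simp [hk, this, hcont k]
    have e1 : (1 : Int) + 0 = 1 := by norm_num
    have e2 : (0 : Int) + 1 = 1 := by norm_num
    rw [e1, e2, PySem.Dict.getD_insert_self]
    exact ⟨check_eq _ _ hInv' i a, rfl, hInv'⟩

theorem fold_lemma (l : List (Int × Int)) :
    ∀ (a : Int) (c f : PySem.Dict Int Int), CFInv c f →
      (l.foldl stepA (a, c, f)).1 = (l.foldl stepB (a, c)).1 := by
  induction l with
  | nil => intro a c f _; rfl
  | cons p t ih =>
      intro a c f hInv
      obtain ⟨i, x⟩ := p
      obtain ⟨h1, h2, h3⟩ := step_lemma a i x c f hInv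
      simp only [List.foldl_cons]
      have hA : t.foldl stepA (stepA (a, c, f) (i, x)) =
          t.foldl stepA ((stepB (a, c) (i, x)).1, (stepB (a, c) (i, x)).2,
            (stepA (a, c, f) (i, x)).2.2) := by
        rw [show stepA (a, c, f) (i, x) = ((stepA (a,c,f) (i,x)).1, (stepA (a,c,f) (i,x)).2.1, (stepA (a,c,f) (i,x)).2.2) from rfl, h1, h2]
      rw [hA]
      have := ih (stepB (a, c) (i, x)).1 (stepB (a, c) (i, x)).2 (stepA (a, c, f) (i, x)).2.2
        (by rw [← h2]; exact h3)
      simpa using this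

-- ===== VERDICT (by name: the statement is the Claim_ definition above) =====
theorem solution_808_5_spec : Claim_equal_solution_808_5 := by
  intro nums _
  unfold Spec_solution_808_5 solution_808_5 solution_808_5_alt
  exact fold_lemma _ 0 _ _ (by unfold CFInv; simp [PySem.Dict.values, PySem.Dict.empty, PySem.Dict.getD, PySem.Dict.get?])
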